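-- pv_equiv track=rewrite | github.com/crumpstrr33/CFOP-cube-solver | cfop/algorithms/tools.py | code_to_alg
-- ===== SOURCE A (Python) =====
-- from string import ascii_lowercase, ascii_uppercase
--
-- def code_to_alg(code):
--     """
--     Does the reverse of alg_to_code. See alg_to_code for details.
--
--     Parameters:
--     code - The code syntax to convert to cubing algorithm
--     """
--     alg = ''
--     alg_chars = 'ulfrbdMxyzULFRBD'
--     code_chars = '1234567890!@#$%^'
--     ccw_lets = ['a', 'c', 'e', 'k', 'q', 't']
--
--     # Checks if syntax is correct
--     for turn in code:
--         if turn.lower() not in code_chars + 'ulfrbdmxyztkeqac':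
--             raise Exception('Incorrect syntax; '
--                             "found '{}' in passed algorithm: ".format(turn) +
--                             '{}'.format(code))
--
--     for n, let in enumerate(code):
--         # Double turns
--         if let in code_chars:
--             alg += alg_chars[code_chars.index(let)] + '2'
--         # CCW rotations
--         elif let in ['X', 'Y', 'Z']:
--             alg += let.lower() + "'"
--         # Middle slice
--         elif let == 'm':
--             alg += let.upper() + "'"
--         # CCW turns
--         elif let.lower() in ccw_lets:
--             if let.islower():
--                 alg += ascii_lowercase[ascii_lowercase.index(let) + 1] + "'"
--             else:
--                 alg += ascii_uppercase[ascii_uppercase.index(let) + 1] + "'"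
--         # CW turns and rotations
--         else:
--             alg += let
--
--         if n + 1 != len(code):
--             alg += ' '
--
--     return alg
-- ===== SOURCE B (Python) =====
-- from string import ascii_lowercase, ascii_uppercase
--
-- def code_to_alg(code):
--     """
--     Does the reverse of alg_to_code. See alg_to_code for details.
--
--     Parameters:
--     code - The code syntax to convert to cubing algorithm
--     """
--     alg_chars = 'ulfrbdMxyzULFRBD'
--     code_chars = '1234567890!@#$%^'
--
--     # Checks if syntax is correct (kept verbatim so the same Exception is raised)
--     for turn in code:
--         if turn.lower() not in code_chars + 'ulfrbdmxyztkeqac':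
--             raise Exception('Incorrect syntax; '
--                             "found '{}' in passed algorithm: ".format(turn) +
--                             '{}'.format(code))
--
--     # One translation table; anything not in it (CW turns/rotations) maps to itself.
--     table = {}
--     for c, a in zip(code_chars, alg_chars):
--         table[c] = a + '2'
--     for c in 'XYZ':
--         table[c] = c.lower() + "'"
--     table['m'] = "M'"
--     for c in 'acekqt':
--         i = ascii_lowercase.index(c)
--         table[c] = ascii_lowercase[i + 1] + "'"
--         table[c.upper()] = ascii_uppercase[i + 1] + "'"
--
--     return ' '.join(table.get(c, c) for c in code)
-- ===== Notes on version B (the rewrite author's own statement) =====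
-- stated objective: idiomatic
-- what changed: The per-character if/elif dispatch and the trailing-space index bookkeeping are replaced by one precomputed translation table and a single ' '.join over a lookup-with-identity-default, so the branch chain and the n+1 != len(code) check disappear.
import Mathlib
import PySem

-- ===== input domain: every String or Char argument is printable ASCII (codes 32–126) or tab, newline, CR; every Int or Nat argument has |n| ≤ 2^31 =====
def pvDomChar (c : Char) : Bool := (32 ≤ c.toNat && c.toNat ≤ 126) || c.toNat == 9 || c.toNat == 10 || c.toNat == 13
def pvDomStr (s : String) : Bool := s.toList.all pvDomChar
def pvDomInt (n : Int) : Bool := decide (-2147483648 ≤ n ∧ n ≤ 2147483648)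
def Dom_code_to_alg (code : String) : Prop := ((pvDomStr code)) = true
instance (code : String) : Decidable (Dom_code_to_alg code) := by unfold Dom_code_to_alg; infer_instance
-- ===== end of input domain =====

-- B replaces A's per-character if/elif chain and trailing-space index check by one
-- precomputed translation table with an identity default plus a single ' '.join (idiomatic).

-- ===== PORT A =====
def pvAlgChars : List Char := "ulfrbdMxyzULFRBD".toList
def pvCodeChars : List Char := "1234567890!@#$%^".toList
def pvCcwLets : List Char := ['a', 'c', 'e', 'k', 'q', 't']
def pvAsciiLowercase : List Char := "abcdefghijklmnopqrstuvwxyz".toList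
def pvAsciiUppercase : List Char := "ABCDEFGHIJKLMNOPQRSTUVWXYZ".toList

-- the characters A's second loop appends for one `let` (without the space)
def pvAPiece (c : Char) : List Char :=
  if c ∈ pvCodeChars then
    [pvAlgChars.getD (pvCodeChars.idxOf c) ' ', '2']
  else if c ∈ ['X', 'Y', 'Z'] then
    [PySem.Chars.lowerChar c, '\'']
  else if c = 'm' then
    [PySem.Chars.upperChar c, '\'']
  else if PySem.Chars.lowerChar c ∈ pvCcwLets then
    if PySem.Chars.islower c then
      [pvAsciiLowercase.getD (pvAsciiLowercase.idxOf c + 1) ' ', '\'']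
    else
      [pvAsciiUppercase.getD (pvAsciiUppercase.idxOf c + 1) ' ', '\'']
  else [c]

def pvValidChar (c : Char) : Bool :=
  decide (PySem.Chars.lowerChar c ∈ pvCodeChars ++ "ulfrbdmxyztkeqac".toList)

-- Python raises an Exception on any invalid character; that case is outside Pre_ below.
def code_to_alg (code : String) : String :=
  let cs := code.toList
  if cs.all pvValidChar then
    String.ofList ((PySem.List.enumerate cs).foldl
      (fun alg p =>
        alg ++ pvAPiece p.2 ++ (if p.1 + 1 ≠ (cs.length : Int) then [' '] else [])) [])
  else ""

-- ===== PORT B =====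
def pvTable : PySem.Dict Char (List Char) :=
  let t : PySem.Dict Char (List Char) := PySem.Dict.empty
  let t := (pvCodeChars.zip pvAlgChars).foldl (fun t p => t.insert p.1 [p.2, '2']) t
  let t := "XYZ".toList.foldl (fun t c => t.insert c [PySem.Chars.lowerChar c, '\'']) t
  let t := t.insert 'm' ['M', '\'']
  "acekqt".toList.foldl (fun t c =>
    let i := pvAsciiLowercase.idxOf c
    (t.insert c [pvAsciiLowercase.getD (i + 1) ' ', '\'']).insert
      (PySem.Chars.upperChar c) [pvAsciiUppercase.getD (i + 1) ' ', '\'']) t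

-- Python raises the same Exception on any invalid character; that case is outside Pre_ below.
def code_to_alg_alt (code : String) : String :=
  let cs := code.toList
  if cs.all pvValidChar then
    String.ofList (PySem.Chars.join [' '] (cs.map (fun c => (pvTable.get? c).getD [c])))
  else ""

-- ===== PRECONDITION & SPEC =====
-- Pre_ excludes exactly the inputs containing a character whose lowercase is not in
-- code_chars + 'ulfrbdmxyztkeqac', on which the Python A raises Exception.
def Pre_code_to_alg (code : String) : Prop := code.toList.all pvValidChar = true
instance (code : String) : Decidable (Pre_code_to_alg code) := by unfold Pre_code_to_alg; infer_instance
def pvWitness_code_to_alg : String := "1mXaR"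

def Spec_code_to_alg (code : String) (out : String) : Prop := out = code_to_alg_alt code
instance (code : String) (out : String) : Decidable (Spec_code_to_alg code out) := by unfold Spec_code_to_alg; infer_instance

-- ===== CLAIM (what is proved, stated in full; the proofs are below) =====
def Claim_equal_code_to_alg : Prop := ∀ (code : String), Dom_code_to_alg code → Pre_code_to_alg code → Spec_code_to_alg code (code_to_alg code)

-- ===== LEMMAS AND PROOFS =====
-- every valid character of the 7-bit domain translates identically under A's branch chain
-- and under B's table lookup (finite check)
set_option maxRecDepth 100000 in
theorem pvPiece_eq_ofNat : ∀ n : Nat, n < 128 → pvValidChar (Char.ofNat n) = true →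
    pvAPiece (Char.ofNat n) = (pvTable.get? (Char.ofNat n)).getD [Char.ofNat n] := by
  decide

theorem pvPiece_eq (c : Char) (hd : pvDomChar c = true) (hv : pvValidChar c = true) :
    pvAPiece c = (pvTable.get? c).getD [c] := by
  have h : c.toNat < 128 := by
    unfold pvDomChar at hd
    simp only [Bool.or_eq_true, Bool.and_eq_true, decide_eq_true_eq, beq_iff_eq] at hd
    omega
  have := pvPiece_eq_ofNat c.toNat h
  rw [Char.ofNat_toNat] at this
  exact this hv

-- A's accumulate-with-trailing-space loop over enumerate(code) is ' '.join of the pieces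
theorem pvLoop_eq_join (f : Char → List Char) :
    ∀ (cs : List Char) (s L : Int) (acc : List Char), L = s + cs.length →
    (PySem.List.enumerate cs s).foldl
      (fun alg p => alg ++ f p.2 ++ (if p.1 + 1 ≠ L then [' '] else [])) acc
      = acc ++ PySem.Chars.join [' '] (cs.map f) := by
  intro cs
  induction cs with
  | nil => intro s L acc hL; simp [PySem.List.enumerate_nil, PySem.Chars.join_nil]
  | cons c rest ih =>
    intro s L acc hL
    rw [PySem.List.enumerate_cons, List.foldl_cons]
    cases rest with
    | nil =>
      have hif : ¬ (s + 1 ≠ L) := by simp at hL ⊢; omega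
      simp [PySem.List.enumerate_nil, hif, PySem.Chars.join_singleton]
    | cons d t =>
      have hif : s + 1 ≠ L := by
        simp only [List.length_cons] at hL; push_cast at hL; omega
      rw [if_pos hif, ih (s + 1) L _ (by simp only [List.length_cons] at hL ⊢; push_cast at hL ⊢; omega)]
      simp only [List.map_cons, PySem.Chars.join_cons_cons, List.append_assoc]

-- ===== VERDICT (by name: the statement is the Claim_ definition above) =====
theorem code_to_alg_spec : Claim_equal_code_to_alg := by
  intro code hdom hpre
  unfold Spec_code_to_alg code_to_alg code_to_alg_alt
  simp only [hpre, if_pos]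
  rw [pvLoop_eq_join pvAPiece code.toList 0 code.toList.length [] (by simp)]
  rw [List.nil_append]
  have hdom' : code.toList.all pvDomChar = true := hdom
  have hmap : List.map pvAPiece code.toList
      = List.map (fun c => (pvTable.get? c).getD [c]) code.toList :=
    List.map_congr_left (fun c hc =>
      pvPiece_eq c (List.all_eq_true.mp hdom' c hc) (List.all_eq_true.mp hpre c hc))
  rw [hmap]
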